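-- pv_equiv track=rewrite | github.com/Jiang0307/WIRELESS_COMMUNICATIONS_AND_MOBILE_NETWORKS | QUESTION 1/BEST_EFFORT.py | check_turn
-- ===== SOURCE A (Python) =====
-- BLOCK_SIZE = (50,50)
--
-- ROAD_WIDTH = 15
--
-- def check_turn(x,y):
--     for i in range(10):
--         for j in range(10):
--             car_x = ( (BLOCK_SIZE[0] + ROAD_WIDTH) * i) + BLOCK_SIZE[0]
--             car_y = ( (BLOCK_SIZE[1] + ROAD_WIDTH) * j) + BLOCK_SIZE[1]
--             if car_x == x and car_y == y:
--                 return 1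
--     return 0
-- ===== SOURCE B (Python) =====
-- BLOCK_SIZE = (50,50)
--
-- ROAD_WIDTH = 15
--
-- _VALID = {BLOCK_SIZE[0] + (BLOCK_SIZE[0] + ROAD_WIDTH) * k for k in range(10)}
--
-- def check_turn(x, y):
--     return 1 if x in _VALID and y in _VALID else 0
-- ===== Notes on version B (the rewrite author's own statement) =====
-- stated objective: simpler
-- what changed: The 10x10 nested scan over all grid intersections is replaced by factoring the condition over the two axes: a set of the 10 valid coordinates is built once at module load and the function is a single membership test per axis, no loop per call.
import Mathlib
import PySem

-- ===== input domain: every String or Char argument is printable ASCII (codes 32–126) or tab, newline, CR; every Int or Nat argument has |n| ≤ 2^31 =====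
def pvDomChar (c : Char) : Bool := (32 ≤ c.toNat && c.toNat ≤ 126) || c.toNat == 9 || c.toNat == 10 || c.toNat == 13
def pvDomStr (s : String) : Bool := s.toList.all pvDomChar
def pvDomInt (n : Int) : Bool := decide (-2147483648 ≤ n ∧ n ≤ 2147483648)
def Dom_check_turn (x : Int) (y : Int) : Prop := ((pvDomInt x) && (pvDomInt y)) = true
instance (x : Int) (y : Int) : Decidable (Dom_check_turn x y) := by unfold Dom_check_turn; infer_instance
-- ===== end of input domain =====

-- B replaces A's 10x10 nested scan with a once-built set of the 10 valid coordinates and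
-- one membership test per axis (objective: simpler).

-- ===== PORT A =====
def pvBLOCK_SIZE : Int × Int := (50, 50)
def pvROAD_WIDTH : Int := 15

-- inner `for j in range(10)` loop for a fixed i; returns 1 on the early `return 1`, 0 if it runs out
def pvInnerA (x y i : Int) : List Int → Int
  | [] => 0
  | j :: js =>
    let car_x := (pvBLOCK_SIZE.1 + pvROAD_WIDTH) * i + pvBLOCK_SIZE.1
    let car_y := (pvBLOCK_SIZE.2 + pvROAD_WIDTH) * j + pvBLOCK_SIZE.2
    if car_x = x ∧ car_y = y then 1 else pvInnerA x y i js

-- outer `for i in range(10)` loop; the inner loop's early return propagates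
def pvOuterA (x y : Int) : List Int → Int
  | [] => 0
  | i :: is =>
    let r := pvInnerA x y i (PySem.List.pyRange 0 10 1)
    if r = 1 then 1 else pvOuterA x y is

def check_turn (x : Int) (y : Int) : Int :=
  pvOuterA x y (PySem.List.pyRange 0 10 1)

-- ===== PORT B =====
-- module-level set {BLOCK_SIZE[0] + (BLOCK_SIZE[0]+ROAD_WIDTH)*k for k in range(10)}
def pvVALID : PySem.Set Int :=
  PySem.Set.ofList ((PySem.List.pyRange 0 10 1).map
    (fun k => pvBLOCK_SIZE.1 + (pvBLOCK_SIZE.1 + pvROAD_WIDTH) * k))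

def check_turn_alt (x : Int) (y : Int) : Int :=
  if x ∈ pvVALID ∧ y ∈ pvVALID then 1 else 0

-- ===== PRECONDITION & SPEC =====
def Spec_check_turn (x : Int) (y : Int) (out : Int) : Prop := out = check_turn_alt x y
instance (x : Int) (y : Int) (out : Int) : Decidable (Spec_check_turn x y out) := by unfold Spec_check_turn; infer_instance

-- ===== CLAIM (what is proved, stated in full; the proofs are below) =====
def Claim_equal_check_turn : Prop := ∀ (x : Int) (y : Int), Dom_check_turn x y → Spec_check_turn x y (check_turn x y)

-- ===== LEMMAS AND PROOFS =====

-- the inner loop finds a hit iff this i gives car_x = x and some j in the list gives car_y = y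
theorem pvInnerA_eq (x y i : Int) (js : List Int) :
    pvInnerA x y i js =
      if 65 * i + 50 = x ∧ ∃ j ∈ js, 65 * j + 50 = y then 1 else 0 := by
  induction js with
  | nil => simp [pvInnerA]
  | cons j js ih =>
    simp only [pvInnerA, pvBLOCK_SIZE, pvROAD_WIDTH, ih, List.exists_mem_cons_iff]
    have e : ((50 : Int) + 15) = 65 := by norm_num
    simp only [e]
    by_cases hx : 65 * i + 50 = x <;>
      by_cases hy : 65 * j + 50 = y <;>
        by_cases hz : ∃ a ∈ js, 65 * a + 50 = y <;>
          simp [hx, hy, hz]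

-- shape of one outer step: early-return test over the inner result, as atoms
theorem pvIfGlue (P Q R : Prop) [Decidable P] [Decidable Q] [Decidable R] :
    (if (if P ∧ Q then (1 : Int) else 0) = 1 then (1 : Int) else if R ∧ Q then 1 else 0)
      = if (P ∨ R) ∧ Q then 1 else 0 := by
  by_cases hP : P <;> by_cases hQ : Q <;> by_cases hR : R <;> simp [hP, hQ, hR]

-- the outer loop finds a hit iff some i in the list matches x and some j in range(10) matches y
theorem pvOuterA_eq (x y : Int) (is : List Int) :
    pvOuterA x y is =
      if (∃ i ∈ is, 65 * i + 50 = x) ∧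
         (∃ j ∈ PySem.List.pyRange 0 10 1, 65 * j + 50 = y) then 1 else 0 := by
  induction is with
  | nil => simp [pvOuterA]
  | cons i is ih =>
    simp only [pvOuterA, pvInnerA_eq, ih, List.exists_mem_cons_iff]
    exact pvIfGlue _ _ _

theorem pvMem_VALID (z : Int) :
    z ∈ pvVALID ↔ ∃ k ∈ PySem.List.pyRange 0 10 1, 65 * k + 50 = z := by
  simp only [pvVALID, pvBLOCK_SIZE, pvROAD_WIDTH, PySem.Set.mem_ofList, List.mem_map]
  constructor
  · rintro ⟨k, hk, rfl⟩; exact ⟨k, hk, by ring⟩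
  · rintro ⟨k, hk, rfl⟩; exact ⟨k, hk, by ring⟩

-- ===== VERDICT (by name: the statement is the Claim_ definition above) =====
theorem check_turn_spec : Claim_equal_check_turn := by
  intro x y _
  unfold Spec_check_turn check_turn check_turn_alt
  rw [pvOuterA_eq]
  simp only [pvMem_VALID]
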